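-- pv_equiv track=rewrite | github.com/dauvannam1804/DSA | bitmask/Mattey_Multiplication.py | multiply_with_shifts
-- ===== SOURCE A (Python) =====
-- def multiply_with_shifts(n, m):
--     shifts = []
--     i = 0
--     while m > 0:
--         if m & 1:
--             shifts.append(i)
--         i += 1
--         m >>= 1
--     shifts.sort(reverse=True)
--     return ' + '.join(f'({n}<<{k})' for k in shifts)
-- ===== SOURCE B (Python) =====
-- def multiply_with_shifts(n, m):
--     # Greedy decomposition: repeatedly peel off the largest power of two <= m.
--     def terms(m):
--         if m <= 0:
--             return []
--         k = m.bit_length() - 1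
--         return [f'({n}<<{k})'] + terms(m - (1 << k))
--     return ' + '.join(terms(m))
-- ===== Notes on version B (the rewrite author's own statement) =====
-- stated objective: alternative
-- what changed: B decomposes m greedily by repeated subtraction of the largest power of two (recursive, emitting each term string immediately in descending order), instead of A's LSB-first bit-masking loop that collects positions and then reverse-sorts them.
import Mathlib
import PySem

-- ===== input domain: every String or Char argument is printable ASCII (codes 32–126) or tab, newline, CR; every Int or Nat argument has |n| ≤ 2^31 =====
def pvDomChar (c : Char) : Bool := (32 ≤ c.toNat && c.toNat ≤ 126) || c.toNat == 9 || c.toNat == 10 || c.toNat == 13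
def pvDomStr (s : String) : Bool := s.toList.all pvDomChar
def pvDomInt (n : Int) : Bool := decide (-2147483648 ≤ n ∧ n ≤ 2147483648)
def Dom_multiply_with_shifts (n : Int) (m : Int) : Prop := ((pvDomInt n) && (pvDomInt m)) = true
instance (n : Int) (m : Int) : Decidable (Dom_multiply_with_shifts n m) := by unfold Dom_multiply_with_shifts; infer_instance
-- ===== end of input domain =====

-- B decomposes m greedily by repeated subtraction of the largest power of two (recursive,
-- emitting terms in descending order), instead of A's LSB bit-mask loop plus reverse sort
-- (objective: alternative).


-- ===== PORT A =====
-- f'({n}<<{k})' — shared formatting helper used by both ports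
def pvFmt (n : Int) (k : Int) : String :=
  "(" ++ PySem.Int.toStr n ++ "<<" ++ PySem.Int.toStr k ++ ")"

-- termination facts for the two loops (cited by name in 'decreasing_by')
lemma pvALoop_dec (m : Int) (h : 0 < m) : (m >>> (1 : Nat)).toNat < m.toNat := by
  simp only [Int.shiftRight_eq_div_pow, pow_one]; omega

lemma pvBGo_dec (m : Int) (h : 0 < m) :
    (m - (1 <<< (((PySem.Int.bitLength m : Int)) - 1).toNat)).toNat < m.toNat := by
  have h1 := PySem.Int.lt_two_pow_bitLength m
  have h2 := PySem.Int.two_pow_bitLength_le m (by omega)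
  have hb1 : 1 ≤ PySem.Int.bitLength m := by
    rcases Nat.eq_zero_or_pos (PySem.Int.bitLength m) with hz | hp
    · rw [hz] at h1; simp at h1; omega
    · exact hp
  have ht : (((PySem.Int.bitLength m : Int)) - 1).toNat = PySem.Int.bitLength m - 1 := by omega
  simp only [ht, Nat.shiftLeft_eq, one_mul]
  have hp : 1 ≤ 2 ^ (PySem.Int.bitLength m - 1) := Nat.one_le_two_pow
  omega

-- the while loop: collects set-bit positions ascending; 'm >>= 1' is 'm >>> 1' (Python-exact)
def pvALoop (m : Int) (i : Int) (shifts : List Int) : List Int :=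
  if 0 < m then
    pvALoop (m >>> (1 : Nat)) (i + 1)
      (if PySem.Int.band m 1 ≠ 0 then shifts ++ [i] else shifts)
  else shifts
termination_by m.toNat
decreasing_by
  exact pvALoop_dec m (by assumption)

def multiply_with_shifts (n : Int) (m : Int) : String :=
  PySem.Str.join " + "
    ((PySem.List.sorted (pvALoop m 0 []) (fun x => x) true).map (pvFmt n))

-- ===== PORT B =====
-- recursive helper 'terms': peel off the largest power of two, emit its term, recurse
def pvBGo (n : Int) (m : Int) : List String :=
  if 0 < m then
    pvFmt n ((PySem.Int.bitLength m : Int) - 1) ::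
      pvBGo n (m - (1 <<< ((PySem.Int.bitLength m : Int) - 1).toNat))
  else []
termination_by m.toNat
decreasing_by
  exact pvBGo_dec m (by assumption)

def multiply_with_shifts_alt (n : Int) (m : Int) : String :=
  PySem.Str.join " + " (pvBGo n m)

-- ===== PRECONDITION & SPEC =====
def Spec_multiply_with_shifts (n : Int) (m : Int) (out : String) : Prop := out = multiply_with_shifts_alt n m
instance (n : Int) (m : Int) (out : String) : Decidable (Spec_multiply_with_shifts n m out) := by unfold Spec_multiply_with_shifts; infer_instance

-- ===== CLAIM (what is proved, stated in full; the proofs are below) =====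
def Claim_equal_multiply_with_shifts : Prop := ∀ (n : Int) (m : Int), Dom_multiply_with_shifts n m → Spec_multiply_with_shifts n m (multiply_with_shifts n m)

-- ===== LEMMAS AND PROOFS =====

lemma pvShift_one_eq_floordiv (m : Int) : m >>> (1 : Nat) = PySem.Int.floordiv m 2 := by
  rw [PySem.Int.floordiv_eq_ediv_of_pos (by omega)]
  simp [Int.shiftRight_eq_div_pow]

lemma pvShift_succ (m : Int) (k : Nat) : m >>> (k + 1) = (m >>> (1 : Nat)) >>> k := by
  simp only [Int.shiftRight_eq_div_pow, pow_succ]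
  rw [mul_comm, Int.natCast_mul]
  exact (Int.ediv_ediv_of_nonneg (by positivity)).symm

-- A's loop collects exactly the set-bit positions of m, ascending, offset by i.
lemma pvALoop_eq (c : Nat) : ∀ (m i : Int) (acc : List Int), m.toNat = c → 0 ≤ m →
    pvALoop m i acc = acc ++
      (PySem.List.pyRange i (i + (PySem.Int.bitLength m : Int)) 1).filter
        (fun j => (PySem.Int.band (m >>> (j - i).toNat) 1) != 0) := by
  induction c using Nat.strong_induction_on with
  | _ c ih =>
    intro m i acc hc hm
    rw [pvALoop]
    by_cases hpos : 0 < m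
    · simp only [if_pos hpos]
      have hbl : PySem.Int.bitLength m = PySem.Int.bitLength (m >>> (1 : Nat)) + 1 := by
        rw [pvShift_one_eq_floordiv]; exact PySem.Int.bitLength_of_pos hpos
      have hhalf0 : 0 ≤ m >>> (1 : Nat) := by
        simp only [Int.shiftRight_eq_div_pow, pow_one]; omega
      have hlt : (m >>> (1 : Nat)).toNat < c := by
        simp only [Int.shiftRight_eq_div_pow, pow_one]; omega
      rw [ih _ hlt _ (i + 1) _ rfl hhalf0]
      have hcons : PySem.List.pyRange i (i + (PySem.Int.bitLength m : Int)) 1 =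
          i :: PySem.List.pyRange (i + 1) (i + (PySem.Int.bitLength m : Int)) 1 :=
        PySem.List.pyRange_one_cons (by omega)
      have hrange : i + (PySem.Int.bitLength m : Int) =
          (i + 1) + (PySem.Int.bitLength (m >>> (1 : Nat)) : Int) := by
        rw [hbl]; push_cast; ring
      rw [hcons, List.filter_cons]
      have hhead : ((PySem.Int.band (m >>> ((i - i).toNat)) 1) != 0) =
          (PySem.Int.band m 1 != 0) := by
        norm_num
      have htail : (PySem.List.pyRange (i + 1) (i + (PySem.Int.bitLength m : Int)) 1).filter
            (fun j => (PySem.Int.band (m >>> (j - i).toNat) 1) != 0) =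
          (PySem.List.pyRange (i + 1) ((i + 1) + (PySem.Int.bitLength (m >>> (1 : Nat)) : Int)) 1).filter
            (fun j => (PySem.Int.band ((m >>> (1 : Nat)) >>> (j - (i + 1)).toNat) 1) != 0) := by
        rw [← hrange]
        apply List.filter_congr
        intro j hj
        have hij : i + 1 ≤ j := ((PySem.List.mem_pyRange_one).1 hj).1
        have : (j - i).toNat = (j - (i + 1)).toNat + 1 := by omega
        rw [this, pvShift_succ]
      rw [hhead, htail]
      split_ifs with hb h2 <;> simp_all
    · simp only [if_neg hpos]
      have hz : m = 0 := by omega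
      subst hz
      simp [PySem.Int.bitLength_zero, PySem.List.pyRange_one_eq_nil]

-- B's greedy recursion produces the descending set-bit terms of m.
lemma pvBGo_eq (c : Nat) : ∀ (n m : Int), m.toNat = c → 0 ≤ m →
    pvBGo n m = (((PySem.List.pyRange 0 (PySem.Int.bitLength m : Int) 1).filter
        (fun j => (PySem.Int.band (m >>> j.toNat) 1) != 0)).reverse).map (pvFmt n) := by
  induction c using Nat.strong_induction_on with
  | _ c ih =>
    intro n m hc hm
    rw [pvBGo]
    by_cases hpos : 0 < m
    · simp only [if_pos hpos]
      have h1 := PySem.Int.lt_two_pow_bitLength m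
      have h2 := PySem.Int.two_pow_bitLength_le m (by omega)
      set b := PySem.Int.bitLength m with hbdef
      have hb1 : 1 ≤ b := by
        rcases Nat.eq_zero_or_pos b with h | h
        · rw [h] at h1; simp at h1; omega
        · exact h
      have ht : (((b : Int)) - 1).toNat = b - 1 := by omega
      simp only [ht, Nat.shiftLeft_eq, one_mul]
      set P : Nat := 2 ^ (b - 1) with hPdef
      set m' : Int := m - (P : Int) with hm'def
      have hPm : (P : Int) ≤ m := by
        have : P ≤ m.natAbs := h2
        omega
      have hmP : m < 2 * (P : Int) := by
        have h3 : m.natAbs < 2 ^ b := h1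
        have hb2 : 2 ^ b = 2 * P := by
          rw [hPdef, ← pow_succ']
          congr 1; omega
        omega
      have hm'0 : 0 ≤ m' := by omega
      have hm'lt : m' < (P : Int) := by omega
      have hltc : m'.toNat < c := by
        have hP1 : 1 ≤ P := Nat.one_le_two_pow
        omega
      -- bit_length(m') ≤ b - 1
      have hb'le : PySem.Int.bitLength m' ≤ b - 1 := by
        rcases eq_or_lt_of_le hm'0 with h0 | h0
        · rw [← h0]; simp [PySem.Int.bitLength_zero]
        · have h3 := PySem.Int.two_pow_bitLength_le m' (by omega)
          have h4 : m'.natAbs < P := by omega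
          have h5 : 2 ^ (PySem.Int.bitLength m' - 1) < 2 ^ (b - 1) := by
            rw [← hPdef]; exact lt_of_le_of_lt h3 h4
          have h6 : PySem.Int.bitLength m' - 1 < b - 1 :=
            (Nat.pow_lt_pow_iff_right (by norm_num)).1 h5
          have hb'1 : 1 ≤ PySem.Int.bitLength m' := by
            have h7 := PySem.Int.lt_two_pow_bitLength m'
            by_contra hcon
            have hz : PySem.Int.bitLength m' = 0 := by omega
            rw [hz] at h7; simp at h7; omega
          omega
      have hm'bd : m' < ((2 ^ PySem.Int.bitLength m' : Nat) : Int) := by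
        have := PySem.Int.lt_two_pow_bitLength m'
        omega
      -- shift values of m in terms of m'
      have hshift : ∀ j : Nat, j ≤ b - 1 →
          m >>> (j : Int) = m' >>> (j : Int) + ((2 ^ (b - 1 - j) : Nat) : Int) := by
        intro j hj
        simp only [Int.shiftRight_natCast_right]
        have hnat : P = 2 ^ (b - 1 - j) * 2 ^ j := by
          rw [hPdef, ← pow_add]; congr 1; omega
        have hm_eq : m = m' + ((2 ^ (b - 1 - j) : Nat) : Int) * ((2 ^ j : Nat) : Int) := by
          have hp2 : (P : Int) = ((2 ^ (b - 1 - j) : Nat) : Int) * ((2 ^ j : Nat) : Int) := by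
            rw [hnat]; push_cast; ring
          omega
        rw [Int.shiftRight_eq_div_pow, Int.shiftRight_eq_div_pow, hm_eq,
          Int.add_mul_ediv_right _ _ (by positivity)]
      simp only [Int.shiftRight_natCast_right] at hshift
      -- split the range of m at bit_length(m') and b-1
      have hsplit : PySem.List.pyRange 0 (b : Int) 1 =
          (PySem.List.pyRange 0 (PySem.Int.bitLength m' : Int) 1 ++
            PySem.List.pyRange (PySem.Int.bitLength m' : Int) ((b : Int) - 1) 1)
            ++ [(b : Int) - 1] := by
        have e1 : PySem.List.pyRange 0 (b : Int) 1 =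
            PySem.List.pyRange 0 ((b : Int) - 1) 1 ++ [(b : Int) - 1] := by
          have := PySem.List.pyRange_one_succ_right (a := 0) (b := (b : Int) - 1) (by omega)
          simpa using this
        have e2 : PySem.List.pyRange 0 ((b : Int) - 1) 1 =
            PySem.List.pyRange 0 (PySem.Int.bitLength m' : Int) 1 ++
              PySem.List.pyRange (PySem.Int.bitLength m' : Int) ((b : Int) - 1) 1 :=
          PySem.List.pyRange_one_append 0 (PySem.Int.bitLength m' : Int) ((b : Int) - 1)
            (by omega) (by omega)
        rw [e1, e2]
      rw [hsplit]
      simp only [List.filter_append, List.filter_cons, List.filter_nil,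
        List.reverse_append, List.map_append, Int.shiftRight_natCast_right]
      -- the top bit of m is set
      have htop : m >>> ((b : Int) - 1).toNat = 1 := by
        simp only [ht]
        have h9 := hshift (b - 1) le_rfl
        have h10 : b - 1 - (b - 1) = 0 := by omega
        rw [h10] at h9
        have hz : m' >>> (b - 1) = 0 := by
          rw [Int.shiftRight_eq_div_pow]
          exact Int.ediv_eq_zero_of_lt hm'0 (by omega)
        rw [h9, hz]; norm_num
      simp only [ht] at htop ⊢
      rw [htop]
      -- middle bits (bit_length(m') ≤ j < b-1) of m are clear
      have hmid : (PySem.List.pyRange (PySem.Int.bitLength m' : Int) ((b : Int) - 1) 1).filter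
          (fun j => (PySem.Int.band (m >>> j.toNat) 1) != 0) = [] := by
        rw [List.filter_eq_nil_iff]
        intro j hj
        obtain ⟨hj1, hj2⟩ := (PySem.List.mem_pyRange_one).1 hj
        have hj0 : 0 ≤ j := le_trans (by exact_mod_cast Nat.zero_le _) hj1
        have hjle : j.toNat ≤ b - 1 := by omega
        simp only [Int.shiftRight_natCast_right]
        rw [hshift j.toNat hjle]
        have hz : m' >>> j.toNat = 0 := by
          rw [Int.shiftRight_eq_div_pow]
          apply Int.ediv_eq_zero_of_lt hm'0
          have hle : (2 : Nat) ^ PySem.Int.bitLength m' ≤ 2 ^ j.toNat :=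
            Nat.pow_le_pow_right (by norm_num) (by omega)
          omega
        rw [hz, zero_add, PySem.Int.band_one, PySem.Int.mod_eq_emod_of_pos (by norm_num)]
        have hev : (2 : Int) ∣ ((2 ^ (b - 1 - j.toNat) : Nat) : Int) := by
          have hne : b - 1 - j.toNat ≠ 0 := by omega
          push_cast
          exact dvd_pow_self 2 hne
        simp only [bne_iff_ne, ne_eq, Decidable.not_not]
        omega
      simp only [Int.shiftRight_natCast_right] at hmid
      rw [hmid]
      -- low bits agree with m'
      have hlow : (PySem.List.pyRange 0 (PySem.Int.bitLength m' : Int) 1).filter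
            (fun j => (PySem.Int.band (m >>> j.toNat) 1) != 0) =
          (PySem.List.pyRange 0 (PySem.Int.bitLength m' : Int) 1).filter
            (fun j => (PySem.Int.band (m' >>> j.toNat) 1) != 0) := by
        apply List.filter_congr
        intro j hj
        obtain ⟨hj1, hj2⟩ := (PySem.List.mem_pyRange_one).1 hj
        have hjlt : j.toNat < PySem.Int.bitLength m' := by omega
        have hjle : j.toNat ≤ b - 1 := by omega
        simp only [Int.shiftRight_natCast_right]
        rw [hshift j.toNat hjle, PySem.Int.band_one, PySem.Int.band_one,
          PySem.Int.mod_eq_emod_of_pos (by norm_num), PySem.Int.mod_eq_emod_of_pos (by norm_num)]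
        have hev : (2 : Int) ∣ ((2 ^ (b - 1 - j.toNat) : Nat) : Int) := by
          have hne : b - 1 - j.toNat ≠ 0 := by omega
          push_cast
          exact dvd_pow_self 2 hne
        have heq : (m' >>> j.toNat + ((2 ^ (b - 1 - j.toNat) : Nat) : Int)) % 2 =
            (m' >>> j.toNat) % 2 := by omega
        rw [heq]
      simp only [Int.shiftRight_natCast_right] at hlow
      rw [hlow]
      have ih' := ih _ hltc n m' rfl hm'0
      simp only [Int.shiftRight_natCast_right] at ih'
      rw [← ih']
      simp
    · simp only [if_neg hpos]
      have hz : m = 0 := by omega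
      subst hz
      simp [PySem.Int.bitLength_zero, PySem.List.pyRange_one_eq_nil]

-- ===== VERDICT (by name: the statement is the Claim_ definition above) =====
theorem multiply_with_shifts_spec : Claim_equal_multiply_with_shifts := by
  intro n m _
  unfold Spec_multiply_with_shifts multiply_with_shifts multiply_with_shifts_alt
  by_cases hm : m ≤ 0
  · rw [pvALoop, if_neg (by omega), pvBGo, if_neg (by omega)]
    rfl
  · have hm' : 0 < m := by omega
    -- A's collected list is the ascending filter of range(0, bit_length(m))
    have hA : pvALoop m 0 [] =
        (PySem.List.pyRange 0 (PySem.Int.bitLength m : Int) 1).filter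
          (fun j => (PySem.Int.band (m >>> j.toNat) 1) != 0) := by
      rw [pvALoop_eq m.toNat m 0 [] rfl (by omega)]
      simp only [Int.sub_zero, List.nil_append, zero_add, Int.shiftRight_natCast_right]
    -- descending sort of a strictly increasing list is its reverse
    have hsorted : PySem.List.sorted (pvALoop m 0 []) (fun x => x) true = (pvALoop m 0 []).reverse := by
      apply PySem.List.sorted_rev_eq_of_perm_of_pairwise_gt
      · exact (pvALoop m 0 []).reverse_perm
      · rw [List.pairwise_reverse, hA]
        exact List.Pairwise.filter _ (PySem.List.pairwise_lt_pyRange_one 0 _)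
    have hB := pvBGo_eq m.toNat n m rfl (by omega)
    simp only [Int.shiftRight_natCast_right] at hB
    rw [hsorted, hA, hB]
    simp only [Int.shiftRight_natCast_right]
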